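-- pv_equiv track=rewrite | github.com/rbhatia1997/CityOfHopeIoTResearch | FA19/Processing_in_Python/processing.py | splitReps
-- ===== SOURCE A (Python) =====
-- def splitReps(L, T1, T2):
--     # initialize useful variables and lists
--     ang_prev = 0
--     count = 0
--     current_rep = []
--     reps = []
--
--     # go through all the angles and separate into reps
--     for ang in L:
--
--         # if the angle is increasing, the rep has not yet ended,
--         # so add that angle to the current rep
--         if abs(ang) >= abs(ang_prev):
--             current_rep += [ang]
--             count = 0
--
--         # if the angle is not increasing, then the rep might be ending
--         else:
--             # increase the count to keep track of how long the angle has been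
--             # decreasing for
--             count += 1
--             current_rep += [ang]
--             # if the count indicates that the angle has been decreasing for
--             # a significant number of data points, the rep may be over
--             if count == T1:
--                 # ensure that the rep is long enough (not a glitch)
--                 if len(current_rep) > T2:
--                     # add rep the to the list of reps
--                     reps += [current_rep]
--                 # reset variables for the next rep
--                 current_rep = []
--                 count = 0
--
--         # set the previous angle equal to the current angle before continuing
--         # with the for loop
--         ang_prev = ang
--
--     return reps
-- ===== SOURCE B (Python) =====
-- def splitReps(L, T1, T2):
--     # Pass 1: scan once recording only (start, end) index bounds of each
--     # completed segment; a boundary fires when the decrease-count hits T1.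
--     bounds = []
--     ang_prev = 0
--     count = 0
--     start = 0
--     for i, ang in enumerate(L):
--         if abs(ang) >= abs(ang_prev):
--             count = 0
--         else:
--             count += 1
--             if count == T1:
--                 bounds.append((start, i))
--                 start = i + 1
--                 count = 0
--         ang_prev = ang
--     # Pass 2: materialize each recorded segment by slicing, keeping only
--     # those longer than T2; any trailing unfinished segment is dropped.
--     reps = []
--     for s, e in bounds:
--         seg = L[s:e + 1]
--         if len(seg) > T2:
--             reps.append(seg)
--     return reps
-- ===== Notes on version B (the rewrite author's own statement) =====
-- stated objective: alternative
-- what changed: B replaces A's single pass that accumulates each rep list element-by-element with a two-pass scheme: pass 1 records only (start, end) index bounds at each T1-boundary, pass 2 slices the input at those bounds and keeps slices longer than T2.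
import Mathlib
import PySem

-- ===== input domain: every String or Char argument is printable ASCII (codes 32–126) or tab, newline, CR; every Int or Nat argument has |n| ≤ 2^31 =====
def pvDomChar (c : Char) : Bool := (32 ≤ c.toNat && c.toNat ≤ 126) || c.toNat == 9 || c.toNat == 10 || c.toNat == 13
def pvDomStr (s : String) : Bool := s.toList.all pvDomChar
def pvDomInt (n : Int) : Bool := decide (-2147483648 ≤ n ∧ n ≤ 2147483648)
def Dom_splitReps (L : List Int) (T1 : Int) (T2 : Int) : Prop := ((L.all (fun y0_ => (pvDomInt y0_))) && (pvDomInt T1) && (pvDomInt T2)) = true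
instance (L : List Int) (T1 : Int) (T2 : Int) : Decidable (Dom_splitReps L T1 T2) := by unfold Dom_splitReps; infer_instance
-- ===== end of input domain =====

-- B replaces A's element-by-element rep accumulation with pass 1 recording (start,end) bounds and pass 2 slicing; return values proved equal.
-- ===== PORT A =====
-- state: (ang_prev, count, current_rep, reps)
def stepA (T1 T2 : Int) (st : Int × Int × List Int × List (List Int)) (ang : Int) :
    Int × Int × List Int × List (List Int) :=
  let (ap, c, cur, reps) := st
  if |ang| ≥ |ap| then (ang, 0, cur ++ [ang], reps)
  else
    let c' := c + 1
    let cur' := cur ++ [ang]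
    if c' = T1 then
      (ang, 0, [], if (cur'.length : Int) > T2 then reps ++ [cur'] else reps)
    else (ang, c', cur', reps)

def splitReps (L : List Int) (T1 : Int) (T2 : Int) : List (List Int) :=
  (L.foldl (stepA T1 T2) (0, 0, [], [])).2.2.2

-- ===== PORT B =====
-- pass-1 state: (ang_prev, count, start, bounds)
def stepB (T1 : Int) (st : Int × Int × Int × List (Int × Int)) (p : Int × Int) :
    Int × Int × Int × List (Int × Int) :=
  let (ap, c, start, bounds) := st
  let (i, ang) := p
  if |ang| ≥ |ap| then (ang, 0, start, bounds)
  else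
    let c' := c + 1
    if c' = T1 then (ang, 0, i + 1, bounds ++ [(start, i)])
    else (ang, c', start, bounds)

def pass2 (L : List Int) (T2 : Int) (bounds : List (Int × Int)) (reps : List (List Int)) :
    List (List Int) :=
  bounds.foldl (fun reps se =>
    let seg := PySem.List.slice L (some se.1) (some (se.2 + 1))
    if (seg.length : Int) > T2 then reps ++ [seg] else reps) reps

def splitReps_alt (L : List Int) (T1 : Int) (T2 : Int) : List (List Int) :=
  pass2 L T2 ((PySem.List.enumerate L 0).foldl (stepB T1) (0, 0, 0, [])).2.2.2 []

-- ===== PRECONDITION & SPEC =====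
def Spec_splitReps (L : List Int) (T1 : Int) (T2 : Int) (out : List (List Int)) : Prop := out = splitReps_alt L T1 T2
instance (L : List Int) (T1 : Int) (T2 : Int) (out : List (List Int)) : Decidable (Spec_splitReps L T1 T2 out) := by unfold Spec_splitReps; infer_instance

-- ===== CLAIM (what is proved, stated in full; the proofs are below) =====
def Claim_equal_splitReps : Prop := ∀ (L : List Int) (T1 : Int) (T2 : Int), Dom_splitReps L T1 T2 → Spec_splitReps L T1 T2 (splitReps L T1 T2)

-- ===== LEMMAS AND PROOFS =====

lemma pass2_acc (L : List Int) (T2 : Int) (bs : List (Int × Int)) (acc : List (List Int)) :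
    pass2 L T2 bs acc = acc ++ pass2 L T2 bs [] := by
  induction bs generalizing acc with
  | nil => simp [pass2]
  | cons b bs ih =>
    simp only [pass2, List.foldl_cons] at *
    rw [ih]; conv_rhs => rw [ih]
    split_ifs <;> simp

lemma pass2_cons (L : List Int) (T2 : Int) (p : Int × Int) (bs : List (Int × Int))
    (acc : List (List Int)) :
    pass2 L T2 (p :: bs) acc
      = pass2 L T2 bs
          (if ((PySem.List.slice L (some p.1) (some (p.2 + 1))).length : Int) > T2
            then acc ++ [PySem.List.slice L (some p.1) (some (p.2 + 1))] else acc) := rfl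

lemma foldB_bounds (T1 : Int) (es : List (Int × Int)) (ap c s : Int) (bs : List (Int × Int)) :
    (es.foldl (stepB T1) (ap, c, s, bs)).2.2.2
      = bs ++ (es.foldl (stepB T1) (ap, c, s, [])).2.2.2 := by
  induction es generalizing ap c s bs with
  | nil => simp
  | cons e es ih =>
    obtain ⟨i, ang⟩ := e
    simp only [List.foldl_cons, stepB]
    split_ifs with h1 h2
    · exact ih ..
    · rw [ih, ih (bs := [] ++ [(s, i)])]; simp
    · exact ih ..

lemma inv (L : List Int) (T1 T2 : Int) (rest : List Int) (j s : Nat) (ap c : Int)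
    (reps : List (List Int))
    (hsj : s ≤ j) (hrest : rest = L.drop j) :
    (rest.foldl (stepA T1 T2) (ap, c, (L.drop s).take (j - s), reps)).2.2.2
      = reps ++ pass2 L T2
          (((PySem.List.enumerate rest (j : Int)).foldl (stepB T1) (ap, c, (s : Int), [])).2.2.2) [] := by
  induction rest generalizing j s ap c reps with
  | nil => simp [pass2]
  | cons x rest ih =>
    have hj : j < L.length := by
      by_contra h
      simp [List.drop_eq_nil_of_le (by omega : L.length ≤ j)] at hrest
    have hx : L[j]? = some x := by
      have h : (x :: rest)[0]? = (L.drop j)[0]? := by rw [hrest]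
      simpa [List.getElem?_drop] using h.symm
    have hrest' : rest = L.drop (j + 1) := by
      have h : List.drop 1 (x :: rest) = List.drop 1 (L.drop j) := by rw [hrest]
      simpa [List.drop_drop, Nat.add_comm] using h
    have hcur : (L.drop s).take (j - s) ++ [x] = (L.drop s).take (j + 1 - s) := by
      have h1 : (L.drop s)[j - s]? = some x := by
        rw [List.getElem?_drop, (by omega : s + (j - s) = j)]; exact hx
      rw [(by omega : j + 1 - s = (j - s) + 1), List.take_succ, h1]
      simp
    have hc1 : (j : Int) + 1 = ((j + 1 : Nat) : Int) := by push_cast; ring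
    rw [PySem.List.enumerate_cons]
    simp only [List.foldl_cons, stepA, stepB]
    by_cases h1 : |x| ≥ |ap|
    · rw [if_pos h1, if_pos h1, hcur, hc1]
      exact ih (j + 1) s x 0 reps (by omega) hrest'
    · rw [if_neg h1, if_neg h1]
      by_cases h2 : c + 1 = T1
      · rw [if_pos h2, if_pos h2]
        have hseg : PySem.List.slice L (some (s : Int)) (some (((j + 1 : Nat)) : Int))
            = (L.drop s).take (j - s) ++ [x] := by
          rw [PySem.List.slice_natCast, hcur]
        have hIH := ih (j + 1) (j + 1) x 0
          (if ((((L.drop s).take (j - s) ++ [x]).length : Int) > T2)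
            then reps ++ [(L.drop s).take (j - s) ++ [x]] else reps)
          (le_refl _) hrest'
        simp only [Nat.sub_self, List.take_zero] at hIH
        rw [hc1, hIH]
        conv_rhs => rw [foldB_bounds]
        simp only [List.nil_append, List.singleton_append]
        rw [pass2_cons, pass2_acc]
        simp only [List.nil_append, hc1, hseg]
        split_ifs with h3
        · conv_rhs => rw [pass2_acc]
          simp
        · simp
      · rw [if_neg h2, if_neg h2, hcur, hc1]
        exact ih (j + 1) s x (c + 1) reps (by omega) hrest'

-- ===== VERDICT (by name: the statement is the Claim_ definition above) =====
theorem splitReps_spec : Claim_equal_splitReps := by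
  intro L T1 T2 _
  unfold Spec_splitReps splitReps splitReps_alt
  have := inv L T1 T2 L 0 0 0 0 [] (le_refl 0) (by simp)
  simpa using this
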